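-- pv_equiv track=rewrite | github.com/harkabeeparolus/pylendar | src/pylendar/pylendar.py | join_continuation_lines
-- ===== SOURCE A (Python) =====
-- def join_continuation_lines(lines: list[str]) -> list[str]:
--     """Join tab-indented continuation lines with their parent line."""
--     result: list[str] = []
--     for line in lines:
--         if line.startswith("\t") and result:
--             # Continuation line - append to previous
--             result[-1] += "\n" + line
--         else:
--             result.append(line)
--     return result
-- ===== SOURCE B (Python) =====
-- def join_continuation_lines(lines: list[str]) -> list[str]:
--     """Join tab-indented continuation lines with their parent line."""
--     result: list[str] = []
--     n = len(lines)
--     i = 0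
--     while i < n:
--         j = i + 1
--         while j < n and lines[j].startswith("\t"):
--             j += 1
--         result.append("\n".join(lines[i:j]))
--         i = j
--     return result
-- ===== Notes on version B (the rewrite author's own statement) =====
-- stated objective: alternative
-- what changed: B is a two-pointer block scanner: an inner loop advances j past the run of consecutive tab-prefixed lines, then emits one '\n'.join(lines[i:j]) per block and jumps i to j; there is no per-line branch on the accumulated result, no 'result nonempty' test and no mutation of the last result element.
import Mathlib
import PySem

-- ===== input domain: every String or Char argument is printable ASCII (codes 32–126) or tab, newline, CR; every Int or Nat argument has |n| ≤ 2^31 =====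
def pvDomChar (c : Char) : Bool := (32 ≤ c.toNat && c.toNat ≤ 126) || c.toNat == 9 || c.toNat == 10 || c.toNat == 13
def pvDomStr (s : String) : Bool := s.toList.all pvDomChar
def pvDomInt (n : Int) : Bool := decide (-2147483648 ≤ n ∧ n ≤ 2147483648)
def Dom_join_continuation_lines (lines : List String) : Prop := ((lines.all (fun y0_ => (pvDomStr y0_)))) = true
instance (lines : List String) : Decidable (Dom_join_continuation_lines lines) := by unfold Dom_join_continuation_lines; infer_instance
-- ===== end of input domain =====

-- B is a two-pointer block scanner (an inner loop finds the end of each run of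
-- tab-prefixed continuation lines, then one slice+join per block) instead of A's
-- per-line branch mutating the last result element; objective: alternative.


-- ===== PORT A =====
-- one loop body step: 'if line.startswith("\t") and result: result[-1] += "\n" + line else: result.append(line)'
def jclStepA (result : List String) (line : String) : List String :=
  if PySem.Str.startswith line "\t" && !result.isEmpty then
    result.dropLast ++ [result.getLast! ++ "\n" ++ line]
  else
    result ++ [line]

def join_continuation_lines (lines : List String) : List String :=
  lines.foldl jclStepA []

-- ===== PORT B =====
-- inner while loop: 'while j < n and lines[j].startswith("\t"): j += 1'
def jclInner (lines : List String) (j : Nat) : Nat :=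
  if h : j < lines.length then
    if PySem.Str.startswith lines[j] "\t" then jclInner lines (j + 1) else j
  else j
termination_by lines.length - j

theorem jclInner_ge (lines : List String) (j : Nat) : j ≤ jclInner lines j := by
  unfold jclInner
  split
  · split
    · exact le_trans (Nat.le_succ j) (jclInner_ge lines (j + 1))
    · exact le_refl j
  · exact le_refl j
termination_by lines.length - j

-- outer while loop: 'j = i+1; (inner); result.append("\n".join(lines[i:j])); i = j'
def jclOuter (lines : List String) (i : Nat) (result : List String) : List String :=
  if _h : i < lines.length then
    let j := jclInner lines (i + 1)
    jclOuter lines j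
      (result ++ [PySem.Str.join "\n" (PySem.List.slice lines (some (i : Int)) (some (j : Int)))])
  else result
termination_by lines.length - i
decreasing_by
  have := jclInner_ge lines (i + 1)
  omega

def join_continuation_lines_alt (lines : List String) : List String :=
  jclOuter lines 0 []

-- ===== PRECONDITION & SPEC =====
def Spec_join_continuation_lines (lines : List String) (out : List String) : Prop := out = join_continuation_lines_alt lines
instance (lines : List String) (out : List String) : Decidable (Spec_join_continuation_lines lines out) := by unfold Spec_join_continuation_lines; infer_instance

-- ===== CLAIM (what is proved, stated in full; the proofs are below) =====
def Claim_equal_join_continuation_lines : Prop := ∀ (lines : List String), Dom_join_continuation_lines lines → Spec_join_continuation_lines lines (join_continuation_lines lines)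

-- ===== LEMMAS AND PROOFS =====

theorem jcl_join_singleton (l : String) : PySem.Str.join "\n" [l] = l := by
  apply String.ext
  simp [PySem.Str.join]

theorem jcl_join_cons_cons (a b : String) (t : List String) :
    PySem.Str.join "\n" (a :: b :: t) = a ++ "\n" ++ PySem.Str.join "\n" (b :: t) := by
  apply String.ext
  have := PySem.Chars.join_cons_cons ['\n'] a.toList b.toList (t.map String.toList)
  simpa [PySem.Str.join] using this

theorem jcl_join_prepend (a b : String) (t : List String) :
    PySem.Str.join "\n" ((a ++ "\n" ++ b) :: t) = a ++ "\n" ++ PySem.Str.join "\n" (b :: t) := by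
  cases t with
  | nil => simp [jcl_join_singleton]
  | cons c t' =>
    rw [jcl_join_cons_cons, jcl_join_cons_cons]
    simp [String.append_assoc]

-- A's fold over a run of tab lines joins them all onto the last element
theorem jcl_fold_tabs (t : List String)
    (ht : ∀ x ∈ t, PySem.Str.startswith x "\t" = true) :
    ∀ (as : List String) (s : String),
      List.foldl jclStepA (as ++ [s]) t = as ++ [PySem.Str.join "\n" (s :: t)] := by
  induction t with
  | nil => intro as s; simp [jcl_join_singleton]
  | cons x t' ih =>
    intro as s
    have hx : PySem.Str.startswith x "\t" = true := ht x (by simp)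
    have hc : (PySem.Str.startswith x "\t" && !(as ++ [s]).isEmpty) = true := by
      rw [hx]; simp
    have hstep : jclStepA (as ++ [s]) x = as ++ [s ++ "\n" ++ x] := by
      unfold jclStepA
      rw [hc]
      simp
    rw [List.foldl_cons, hstep, ih (fun y hy => ht y (by simp [hy])) as (s ++ "\n" ++ x),
      jcl_join_prepend, jcl_join_cons_cons]

theorem jcl_dropWhile_head (p : String → Bool) (l : List String) (x : String) (r : List String)
    (h : l.dropWhile p = x :: r) : p x = false := by
  induction l with
  | nil => simp [List.dropWhile] at h
  | cons a l' ih =>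
    rw [List.dropWhile_cons] at h
    by_cases hp : p a = true
    · rw [if_pos hp] at h; exact ih h
    · rw [if_neg hp] at h
      injection h with h1 _
      subst h1
      simpa using hp

theorem jcl_inner_char (lines : List String) (j : Nat) :
    jclInner lines j
      = j + ((lines.drop j).takeWhile (fun s => PySem.Str.startswith s "\t")).length := by
  unfold jclInner
  split
  · rename_i h
    rw [List.drop_eq_getElem_cons h]
    split
    · rename_i htab
      rw [jcl_inner_char lines (j + 1), List.takeWhile_cons, if_pos htab]
      simp; omega
    · rename_i htab
      rw [List.takeWhile_cons, if_neg htab]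
      simp
  · rename_i h
    rw [List.drop_eq_nil_of_le (by omega)]
    simp
termination_by lines.length - j

-- main invariant: A's fold over the suffix from i equals B's outer loop from i,
-- provided the accumulator is empty or lines[i] does not start a continuation
theorem jcl_main (lines : List String) (i : Nat) (acc : List String)
    (hacc : acc = [] ∨ ∀ (h : i < lines.length), PySem.Str.startswith lines[i] "\t" = false) :
    List.foldl jclStepA acc (lines.drop i) = jclOuter lines i acc := by
  by_cases h : i < lines.length
  · set tabP : String → Bool := fun s => PySem.Str.startswith s "\t" with htabP
    set t := (lines.drop (i + 1)).takeWhile tabP with htdef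
    have hj : jclInner lines (i + 1) = i + 1 + t.length := jcl_inner_char lines (i + 1)
    have hsplit : lines.drop (i + 1) = t ++ (lines.drop (i + 1)).dropWhile tabP := by
      rw [htdef, List.takeWhile_append_dropWhile]
    have hdropj : lines.drop (i + 1 + t.length) = (lines.drop (i + 1)).dropWhile tabP := by
      rw [← List.drop_drop]
      conv_lhs => rw [hsplit]
      rw [List.drop_left]
    -- A side
    have hstep : jclStepA acc lines[i] = acc ++ [lines[i]] := by
      unfold jclStepA
      rcases hacc with rfl | hni
      · simp
      · rw [hni h]; simp
    have hA : List.foldl jclStepA acc (lines.drop i)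
        = List.foldl jclStepA (acc ++ [PySem.Str.join "\n" (lines[i] :: t)])
            (lines.drop (i + 1 + t.length)) := by
      rw [List.drop_eq_getElem_cons h, List.foldl_cons, hstep]
      conv_lhs => rw [hsplit]
      rw [List.foldl_append,
        jcl_fold_tabs t (fun y hy => List.mem_takeWhile_imp (p := tabP) hy) acc lines[i], hdropj]
    -- B side
    have hslice : PySem.List.slice lines (some (i : Int)) (some ((i + 1 + t.length : Nat) : Int))
        = lines[i] :: t := by
      rw [PySem.List.slice_natCast]
      rw [List.drop_eq_getElem_cons h]
      have he : (i + 1 + t.length) - i = t.length + 1 := by omega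
      rw [he, List.take_succ_cons]
      congr 1
      conv_lhs => rw [hsplit]
      exact List.take_left
    have hB : jclOuter lines i acc
        = jclOuter lines (i + 1 + t.length) (acc ++ [PySem.Str.join "\n" (lines[i] :: t)]) := by
      rw [jclOuter]
      rw [dif_pos h]
      simp only [hj, hslice]
    rw [hA, hB]
    -- recursive call at i' = i + 1 + t.length
    refine jcl_main lines (i + 1 + t.length) (acc ++ [PySem.Str.join "\n" (lines[i] :: t)]) (Or.inr ?_)
    intro h'
    have hcons : (lines.drop (i + 1)).dropWhile tabP
        = lines[i + 1 + t.length] :: lines.drop (i + 1 + t.length + 1) := by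
      rw [← hdropj, List.drop_eq_getElem_cons h']
    exact jcl_dropWhile_head tabP (lines.drop (i + 1)) _ _ hcons
  · rw [List.drop_eq_nil_of_le (by omega)]
    rw [jclOuter, dif_neg h]
    rfl
termination_by lines.length - i
decreasing_by omega

-- ===== VERDICT (by name: the statement is the Claim_ definition above) =====
theorem join_continuation_lines_spec : Claim_equal_join_continuation_lines := by
  intro lines _
  unfold Spec_join_continuation_lines join_continuation_lines join_continuation_lines_alt
  have h := jcl_main lines 0 [] (Or.inl rfl)
  simpa using h
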